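-- pv_equiv track=rewrite | github.com/Nanazuzu/PythonLearn | 2025_04_28/2025_04_28.py | zero_erase_difference
-- ===== SOURCE A (Python) =====
-- def zero_erase_difference(n: int) -> int:
--   e = 0
--   list_num = []
--   f = n
--   while(True):
--     if n // 10 ** e != 0:
--       e += 1
--     else:
--       e -= 1
--       break
--   for index in range(e, -1, -1):
--     if f // 10 ** index == 0:
--       continue
--     i = f
--     i //= 10 ** index
--     list_num.append(i)
--     f %= 10 ** index
--   sum_list = 0
--   cnt = 0
--   for ide in range(len(list_num) - 1, -1, -1):
--     sum_list += list_num[cnt] * (10 ** ide)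
--     cnt += 1
--   return n - sum_list
-- ===== SOURCE B (Python) =====
-- def zero_erase_difference(n: int) -> int:
--   m = n
--   s = 0
--   place = 1
--   while m > 0:
--     d = m % 10
--     if d != 0:
--       s += d * place
--       place *= 10
--     m //= 10
--   return n - s
-- ===== Notes on version B (the rewrite author's own statement) =====
-- stated objective: simpler
-- what changed: B replaces A's three passes (a digit-count search loop, a high-to-low nonzero-digit extraction building a list, and a separate reassembly loop over that list) by a single low-to-high while loop keeping a running place multiplier and accumulator, then returns n - s.
import Mathlib
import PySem

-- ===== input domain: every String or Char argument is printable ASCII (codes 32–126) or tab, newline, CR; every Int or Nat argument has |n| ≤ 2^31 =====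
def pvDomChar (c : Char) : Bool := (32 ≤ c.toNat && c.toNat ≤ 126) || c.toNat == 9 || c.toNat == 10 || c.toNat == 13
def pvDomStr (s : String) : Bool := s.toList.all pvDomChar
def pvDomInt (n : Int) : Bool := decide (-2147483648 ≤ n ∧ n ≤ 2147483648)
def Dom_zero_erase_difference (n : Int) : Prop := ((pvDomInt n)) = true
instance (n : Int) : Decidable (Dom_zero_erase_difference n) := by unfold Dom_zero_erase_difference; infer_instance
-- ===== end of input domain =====

-- B strips the zero digits in one low-to-high pass with a running place multiplier instead of
-- A's three passes (digit-count search, high-to-low extraction into a list, reassembly loop);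
-- equal return values on all n ≥ 0 (A never terminates on negative n).

-- ===== PORT A =====
-- Python's unbounded `while True` digit-count search; the fuel (64) only makes the search total:
-- under Pre_ (0 ≤ n) and Dom (n ≤ 2^31 < 10^64) the loop always breaks before the fuel runs out.
def findE (fuel : Nat) (n : Int) (e : Nat) : Int :=
  match fuel with
  | 0 => (e : Int) - 1
  | fuel + 1 =>
      if PySem.Int.floordiv n (10 ^ e) ≠ 0 then findE fuel n (e + 1) else (e : Int) - 1

-- body of A's extraction loop (state: list_num, f); index ≥ 0 in every executed iteration, so
-- `index.toNat` renders Python's `10 ** index` exactly.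
def stepA (st : List Int × Int) (index : Int) : List Int × Int :=
  if PySem.Int.floordiv st.2 (10 ^ index.toNat) = 0 then st
  else (st.1 ++ [PySem.Int.floordiv st.2 (10 ^ index.toNat)],
        PySem.Int.mod st.2 (10 ^ index.toNat))

-- body of A's reassembly loop (state: sum_list, cnt); list_num[cnt] is always in range in Python.
def stepR (L : List Int) (st : Int × Int) (ide : Int) : Int × Int :=
  (st.1 + PySem.List.pyGetD L st.2 0 * 10 ^ ide.toNat, st.2 + 1)

def zero_erase_difference (n : Int) : Int :=
  let e := findE 64 n 0
  let st := (PySem.List.pyRange e (-1) (-1)).foldl stepA ([], n)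
  let list_num := st.1
  let st2 := (PySem.List.pyRange ((list_num.length : Int) - 1) (-1) (-1)).foldl (stepR list_num) (0, 0)
  n - st2.1

-- ===== PORT B =====
def altLoop (m s place : Int) : Int :=
  if h : 0 < m then
    let d := PySem.Int.mod m 10
    altLoop (PySem.Int.floordiv m 10)
      (if d ≠ 0 then s + d * place else s)
      (if d ≠ 0 then place * 10 else place)
  else s
termination_by m.toNat
decreasing_by
  have h10 : PySem.Int.floordiv m 10 = m / 10 := PySem.Int.floordiv_eq_ediv_of_pos (by omega)
  simp only [h10]; omega

def zero_erase_difference_alt (n : Int) : Int := n - altLoop n 0 1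

-- ===== PRECONDITION & SPEC =====
-- A's digit-count `while True` loop never breaks for n < 0 (n // 10**e stays negative), so the
-- Python A diverges there and returns on exactly the n ≥ 0; Pre_ admits all of those.
def Pre_zero_erase_difference (n : Int) : Prop := 0 ≤ n
instance (n : Int) : Decidable (Pre_zero_erase_difference n) := by
  unfold Pre_zero_erase_difference; infer_instance

def pvWitness_zero_erase_difference : Int := (1052)

def Spec_zero_erase_difference (n : Int) (out : Int) : Prop := out = zero_erase_difference_alt n
instance (n : Int) (out : Int) : Decidable (Spec_zero_erase_difference n out) := by
  unfold Spec_zero_erase_difference; infer_instance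

-- ===== CLAIM (what is proved, stated in full; the proofs are below) =====
def Claim_equal_zero_erase_difference : Prop :=
  ∀ (n : Int), Dom_zero_erase_difference n → Pre_zero_erase_difference n →
    Spec_zero_erase_difference n (zero_erase_difference n)

-- ===== LEMMAS AND PROOFS =====

-- nonzero digits of a natural number, least significant first
def nz (m : Nat) : List Int :=
  if h : m = 0 then []
  else if m % 10 = 0 then nz (m / 10) else ((m % 10 : Nat) : Int) :: nz (m / 10)
termination_by m
decreasing_by all_goals exact Nat.div_lt_self (Nat.pos_of_ne_zero h) (by omega)

-- value of a digit list, least significant digit first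
def ofD : List Int → Int
  | [] => 0
  | d :: t => d + 10 * ofD t

-- value of a digit list, most significant digit first, on top of accumulator a
def val (a : Int) (L : List Int) : Int := L.foldl (fun x d => x * 10 + d) a

-- nonzero digits of f (read as a (j+1)-digit number), most significant first
def hidigits : Nat → Nat → List Int
  | 0, f => if f = 0 then [] else [(f : Int)]
  | j + 1, f =>
      (if f / 10 ^ (j + 1) = 0 then [] else [((f / 10 ^ (j + 1) : Nat) : Int)]) ++
        hidigits j (f % 10 ^ (j + 1))

lemma nz_zero : nz 0 = [] := by rw [nz]; simp

lemma pow_cast (k : Nat) : ((10 : Int) ^ k) = ((10 ^ k : Nat) : Int) := by push_cast; ring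

lemma val_init (L : List Int) : ∀ (a : Int), val a L = a * 10 ^ L.length + val 0 L := by
  induction L with
  | nil => intro a; simp [val]
  | cons d t ih =>
      intro a
      simp only [val, List.foldl_cons] at *
      rw [ih (a * 10 + d), ih (0 * 10 + d)]
      push_cast [List.length_cons]
      ring

lemma val_reverse (L : List Int) : val 0 L.reverse = ofD L := by
  induction L with
  | nil => simp [val, ofD]
  | cons d t ih =>
      simp only [List.reverse_cons, ofD]
      rw [val, List.foldl_append, ← val, ← val, val_init [d], ih]
      simp [val]
      ring

lemma altLoop_eq (m : Nat) : ∀ (s place : Int), altLoop (m : Int) s place = s + place * ofD (nz m) := by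
  induction m using Nat.strong_induction_on with
  | _ m ih =>
    intro s place
    rw [altLoop, nz]
    by_cases h0 : m = 0
    · subst h0; simp [ofD]
    · have hpos : (0 : Int) < (m : Int) := by exact_mod_cast Nat.pos_of_ne_zero h0
      rw [dif_pos hpos, dif_neg h0]
      have hmod : PySem.Int.mod (m : Int) 10 = ((m % 10 : Nat) : Int) := by
        exact_mod_cast PySem.Int.mod_natCast m 10
      have hdiv : PySem.Int.floordiv (m : Int) 10 = ((m / 10 : Nat) : Int) := by
        exact_mod_cast PySem.Int.floordiv_natCast m 10
      rw [hmod, hdiv]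
      by_cases hz : m % 10 = 0
      · simp only [hz, Nat.cast_zero, ne_eq, not_true_eq_false, if_false]
        simpa using ih (m / 10) (Nat.div_lt_self (Nat.pos_of_ne_zero h0) (by omega)) s place
      · have hz' : ((m % 10 : Nat) : Int) ≠ 0 := by exact_mod_cast hz
        rw [if_neg hz]
        simp only [ne_eq, hz', not_false_eq_true, if_true]
        rw [ih (m / 10) (Nat.div_lt_self (Nat.pos_of_ne_zero h0) (by omega))]
        simp [ofD]; ring

lemma nz_add_high (hd : Nat) (hhd : hd ≠ 0) (hhd10 : hd < 10) :
    ∀ (k r : Nat), r < 10 ^ k → nz (r + hd * 10 ^ k) = nz r ++ [(hd : Int)] := by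
  intro k
  induction k with
  | zero =>
      intro r hr
      interval_cases r
      rw [nz_zero]
      rw [nz]
      rw [dif_neg (by simpa using hhd)]
      have h1 : (0 + hd * 10 ^ 0) % 10 = hd := by simp; omega
      have h2 : (0 + hd * 10 ^ 0) / 10 = 0 := by simp; omega
      rw [if_neg (by omega), h1, h2, nz_zero]
      simp
  | succ k ih =>
      intro r hr
      set p := 10 ^ k with hp
      have hppos : 0 < p := Nat.pos_of_ne_zero (by positivity)
      have hqpos : 0 < hd * p := Nat.mul_pos (Nat.pos_of_ne_zero hhd) hppos
      have hr' : r < 10 * p := by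
        have h : 10 ^ (k + 1) = 10 * p := by rw [hp, pow_succ]; ring
        omega
      set f := r + hd * 10 ^ (k + 1) with hf
      have hf10 : f = r + 10 * (hd * p) := by rw [hf, hp, pow_succ]; ring
      have hfm : f % 10 = r % 10 := by omega
      have hfd : f / 10 = r / 10 + hd * p := by omega
      have hfne : f ≠ 0 := by omega
      have hrd : r / 10 < p := by omega
      have hrec : nz (f / 10) = nz (r / 10) ++ [(hd : Int)] := by
        rw [hfd, hp]; exact ih (r / 10) hrd
      by_cases hz : r % 10 = 0
      · have hnzr : nz r = nz (r / 10) := by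
          by_cases hr0 : r = 0
          · subst hr0; simp [nz_zero]
          · rw [nz, dif_neg hr0, if_pos hz]
        rw [nz, dif_neg hfne, if_pos (by omega), hrec, hnzr]
      · have hnzr : nz r = ((r % 10 : Nat) : Int) :: nz (r / 10) := by
          rw [nz, dif_neg (by omega), if_neg hz]
        rw [nz, dif_neg hfne, if_neg (by omega), hfm, hrec, hnzr]
        simp

lemma hidigits_eq_reverse_nz (j : Nat) : ∀ (f : Nat), f < 10 ^ (j + 1) →
    hidigits j f = (nz f).reverse := by
  induction j with
  | zero =>
      intro f hf
      have hf10 : f < 10 := by simpa using hf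
      by_cases h0 : f = 0
      · subst h0; simp [hidigits, nz_zero]
      · rw [nz, dif_neg h0, if_neg (by omega)]
        have h1 : f % 10 = f := Nat.mod_eq_of_lt hf10
        have h2 : f / 10 = 0 := Nat.div_eq_of_lt hf10
        simp [hidigits, h0, h1, h2, nz_zero]
  | succ j ih =>
      intro f hf
      set hd := f / 10 ^ (j + 1) with hhd
      set r := f % 10 ^ (j + 1) with hr
      have hppos : 0 < 10 ^ (j + 1) := by positivity
      have hrlt : r < 10 ^ (j + 1) := Nat.mod_lt _ hppos
      have hsucc : (10 : Nat) ^ (j + 1 + 1) = 10 * 10 ^ (j + 1) := by rw [pow_succ]; ring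
      have hf' : f < 10 ^ (j + 1) * 10 := by rw [← pow_succ]; exact hf
      have hdlt : hd < 10 := by
        rw [hhd]
        exact Nat.div_lt_of_lt_mul hf'
      have hfeq : f = r + hd * 10 ^ (j + 1) := by
        rw [hhd, hr, Nat.mod_add_div' f (10 ^ (j + 1))]
      by_cases h0 : hd = 0
      · have hfr : f = r := by rw [hfeq, h0]; simp
        rw [hfr, ← ih r hrlt]
        have hd1 : r / 10 ^ (j + 1) = 0 := Nat.div_eq_of_lt hrlt
        have hd2 : r % 10 ^ (j + 1) = r := Nat.mod_eq_of_lt hrlt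
        simp [hidigits, hd1, hd2]
      · simp only [hidigits, ← hhd, ← hr, if_neg h0]
        rw [ih r hrlt]
        conv_rhs => rw [hfeq, nz_add_high hd h0 hdlt (j + 1) r hrlt]
        simp

lemma findE_spec (n : Int) (hn : 0 ≤ n) :
    ∀ (fuel e : Nat), n < 10 ^ (e + fuel) →
      (n < 10 ^ e ∧ findE fuel n e = (e : Int) - 1) ∨
      (∃ j : Nat, e ≤ j ∧ 10 ^ j ≤ n ∧ n < 10 ^ (j + 1) ∧ findE fuel n e = (j : Int)) := by
  intro fuel
  induction fuel with
  | zero =>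
      intro e hlt
      exact Or.inl ⟨by simpa using hlt, rfl⟩
  | succ fuel ih =>
      intro e hlt
      have hpow : (0 : Int) < 10 ^ e := by positivity
      rw [findE]
      have hdiv : PySem.Int.floordiv n (10 ^ e) = n / 10 ^ e :=
        PySem.Int.floordiv_eq_ediv_of_pos hpow
      by_cases hge : 10 ^ e ≤ n
      · have hne : n / 10 ^ e ≠ 0 := by
          have h1 : 1 ≤ n / 10 ^ e := Int.le_ediv_iff_mul_le hpow |>.mpr (by simpa using hge)
          omega
        rw [if_pos (by rw [hdiv]; exact hne)]
        have hlt' : n < 10 ^ (e + 1 + fuel) := by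
          have : e + 1 + fuel = e + (fuel + 1) := by omega
          rw [this]; exact hlt
        rcases ih (e + 1) hlt' with ⟨h1, h2⟩ | ⟨j, hj1, hj2, hj3, hj4⟩
        · exact Or.inr ⟨e, le_refl e, hge, h1, by rw [h2]; push_cast; ring⟩
        · exact Or.inr ⟨j, by omega, hj2, hj3, hj4⟩
      · have heq : n / 10 ^ e = 0 := by
          apply Int.ediv_eq_zero_of_lt hn; omega
        rw [if_neg (by rw [hdiv, heq]; simp)]
        exact Or.inl ⟨by omega, rfl⟩

lemma extractA (j : Nat) : ∀ (f : Nat) (L : List Int), f < 10 ^ (j + 1) →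
    (PySem.List.pyRange (j : Int) (-1) (-1)).foldl stepA (L, (f : Int)) =
      (L ++ hidigits j f, 0) := by
  induction j with
  | zero =>
      intro f L hf
      have hf10 : f < 10 := by simpa using hf
      rw [PySem.List.pyRange_neg_one_cons (by omega), PySem.List.pyRange_neg_one_eq_nil (by omega)]
      simp only [List.foldl_cons, List.foldl_nil]
      rw [stepA]
      simp only [Nat.cast_zero, Int.toNat_zero, pow_zero]
      by_cases h0 : f = 0
      · subst h0
        rw [if_pos (by simp [PySem.Int.floordiv])]
        simp [hidigits]
      · rw [if_neg (by
          rw [show ((1 : Int)) = ((1 : Nat) : Int) by simp, PySem.Int.floordiv_natCast]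
          simpa using h0)]
        simp only [hidigits, if_neg h0]
        rw [show ((1 : Int)) = ((1 : Nat) : Int) by simp, PySem.Int.floordiv_natCast,
            PySem.Int.mod_natCast]
        simp
  | succ j ih =>
      intro f L hf
      rw [PySem.List.pyRange_neg_one_cons (by
        have : (0 : Int) ≤ (j + 1 : Nat) := by positivity
        omega)]
      simp only [List.foldl_cons]
      have htn : ((j + 1 : Nat) : Int).toNat = j + 1 := by simp
      have hnext : ((j + 1 : Nat) : Int) - 1 = (j : Int) := by push_cast; ring
      rw [stepA]
      simp only [htn, hnext]
      have hmlt : f % 10 ^ (j + 1) < 10 ^ (j + 1) := Nat.mod_lt _ (by positivity)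
      by_cases h0 : f / 10 ^ (j + 1) = 0
      · rw [if_pos (by rw [pow_cast, PySem.Int.floordiv_natCast]; exact_mod_cast h0)]
        have hflt : f < 10 ^ (j + 1) := by
          rcases Nat.lt_or_ge f (10 ^ (j + 1)) with h | h
          · exact h
          · exact absurd h0 (by have := Nat.one_le_div_iff (by positivity : 0 < 10 ^ (j+1)) |>.mpr h; omega)
        have hmod : f % 10 ^ (j + 1) = f := Nat.mod_eq_of_lt hflt
        rw [ih f L hflt]
        simp [hidigits, h0, hmod]
      · rw [if_neg (by rw [pow_cast, PySem.Int.floordiv_natCast]; exact_mod_cast h0)]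
        rw [pow_cast, PySem.Int.floordiv_natCast, PySem.Int.mod_natCast]
        rw [ih (f % 10 ^ (j + 1)) (L ++ [((f / 10 ^ (j + 1) : Nat) : Int)]) hmlt]
        simp [hidigits, h0]

lemma recombA (R : List Int) : ∀ (L : List Int) (s : Int) (c : Nat), L.drop c = R →
    (PySem.List.pyRange ((R.length : Int) - 1) (-1) (-1)).foldl (stepR L) (s, (c : Int)) =
      (s + val 0 R, (c : Int) + R.length) := by
  induction R with
  | nil =>
      intro L s c hdrop
      rw [PySem.List.pyRange_neg_one_eq_nil (by simp)]
      simp [val]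
  | cons d R' ih =>
      intro L s c hdrop
      have hlen : ((d :: R').length : Int) - 1 = (R'.length : Int) := by
        push_cast [List.length_cons]; ring
      rw [hlen, PySem.List.pyRange_neg_one_cons (by omega)]
      simp only [List.foldl_cons]
      have hget : PySem.List.pyGetD L (c : Int) 0 = d := by
        rw [PySem.List.pyGetD_natCast]
        have h1 : L[c]? = some d := by
          have key : (L.drop c)[0]? = L[c + 0]? := List.getElem?_drop
          rw [hdrop] at key
          simpa using key.symm
        simp [List.getD, h1]
      have hdrop' : L.drop (c + 1) = R' := by
        have : L.drop (c + 1) = (L.drop c).drop 1 := by rw [List.drop_drop]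
        rw [this, hdrop]
        simp
      have hstep : stepR L (s, (c : Int)) (R'.length : Int) =
          (s + d * 10 ^ R'.length, ((c + 1 : Nat) : Int)) := by
        rw [stepR, hget]
        simp
      rw [hstep, ih L (s + d * 10 ^ R'.length) (c + 1) hdrop']
      have hval : val 0 (d :: R') = d * 10 ^ R'.length + val 0 R' := by
        show val (0 * 10 + d) R' = _
        rw [val_init R' (0 * 10 + d)]
        ring_nf
      rw [hval, Prod.mk.injEq]
      refine ⟨by ring, by push_cast [List.length_cons]; ring⟩

-- ===== VERDICT (by name: the statement is the Claim_ definition above) =====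
theorem zero_erase_difference_spec : Claim_equal_zero_erase_difference := by
  intro n hdom hpre
  unfold Spec_zero_erase_difference
  unfold Pre_zero_erase_difference at hpre
  have hdom' : n ≤ 2147483648 := by
    unfold Dom_zero_erase_difference pvDomInt at hdom
    rw [decide_eq_true_iff] at hdom
    exact hdom.2
  have h64 : n < 10 ^ (0 + 64) := by
    calc n ≤ 2147483648 := hdom'
    _ < 10 ^ (0 + 64) := by norm_num
  rcases findE_spec n hpre 64 0 h64 with ⟨h1, _⟩ | ⟨j, _, hj2, hj3, hj4⟩
  · -- n < 10^0 = 1, so n = 0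
    have hn0 : n = 0 := by simpa using le_antisymm (by omega) hpre
    subst hn0
    have he : findE 64 0 0 = -1 := by decide
    have hA : zero_erase_difference 0 = 0 := by
      simp [zero_erase_difference, he, PySem.List.pyRange_neg_one_eq_nil]
    have hB : zero_erase_difference_alt 0 = 0 := by
      rw [zero_erase_difference_alt, altLoop]; simp
    rw [hA, hB]
  · -- n > 0 with j+1 digits
    set m := n.toNat with hm
    have hnm : (m : Int) = n := Int.toNat_of_nonneg hpre
    have hmlt : m < 10 ^ (j + 1) := by
      have := hj3
      rw [← hnm, pow_cast] at this
      exact_mod_cast this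
    have hext := extractA j m [] hmlt
    rw [hnm] at hext
    have hrec := recombA (hidigits j m) (hidigits j m) 0 0 rfl
    simp only [Nat.cast_zero] at hrec
    have hA : zero_erase_difference n = n - val 0 (hidigits j m) := by
      simp only [zero_erase_difference, hj4, hext, List.nil_append, hrec]
      ring
    have hB : zero_erase_difference_alt n = n - ofD (nz m) := by
      rw [zero_erase_difference_alt, ← hnm, altLoop_eq m 0 1]
      ring
    rw [hA, hB, hidigits_eq_reverse_nz j m hmlt, val_reverse]
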